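-- pv_equiv track=rewrite | github.com/visualcomments/agents_4_puzzles | competitions/cayley-py-megaminx/solve_module.py | apply_moves
-- ===== SOURCE A (Python) =====
-- from typing import Any, Dict, List, Sequence, Tuple, Union
--
-- def _apply_perm(state: List[int], perm: List[int]) -> List[int]:
--     return [state[j] for j in perm]
--
-- def apply_moves(vec: Sequence[int], moves: Sequence[str], generators: Dict[str, List[int]]) -> List[int]:
--     state = list(vec)
--     for move in moves:
--         perm = generators.get(move)
--         if perm is None:
--             raise KeyError(move)
--         state = _apply_perm(state, perm)
--     return state
-- ===== SOURCE B (Python) =====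
-- from typing import Dict, List, Sequence
--
-- def apply_moves(vec: Sequence[int], moves: Sequence[str], generators: Dict[str, List[int]]) -> List[int]:
--     # Fold all moves into a single composed index table (right to left),
--     # then apply it to vec once.
--     comp = None  # None = identity table so far
--     for move in reversed(moves):
--         perm = generators.get(move)
--         if perm is None:
--             raise KeyError(move)
--         if comp is None:
--             comp = list(perm)
--         else:
--             comp = [perm[c] for c in comp]
--     if comp is None:
--         return list(vec)
--     return [vec[c] for c in comp]
-- ===== Notes on version B (the rewrite author's own statement) =====
-- stated objective: alternative
-- what changed: Instead of threading the state vector through every move, B folds the moves (right to left) into a single composed index table and applies it to vec once at the end.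
import Mathlib
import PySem

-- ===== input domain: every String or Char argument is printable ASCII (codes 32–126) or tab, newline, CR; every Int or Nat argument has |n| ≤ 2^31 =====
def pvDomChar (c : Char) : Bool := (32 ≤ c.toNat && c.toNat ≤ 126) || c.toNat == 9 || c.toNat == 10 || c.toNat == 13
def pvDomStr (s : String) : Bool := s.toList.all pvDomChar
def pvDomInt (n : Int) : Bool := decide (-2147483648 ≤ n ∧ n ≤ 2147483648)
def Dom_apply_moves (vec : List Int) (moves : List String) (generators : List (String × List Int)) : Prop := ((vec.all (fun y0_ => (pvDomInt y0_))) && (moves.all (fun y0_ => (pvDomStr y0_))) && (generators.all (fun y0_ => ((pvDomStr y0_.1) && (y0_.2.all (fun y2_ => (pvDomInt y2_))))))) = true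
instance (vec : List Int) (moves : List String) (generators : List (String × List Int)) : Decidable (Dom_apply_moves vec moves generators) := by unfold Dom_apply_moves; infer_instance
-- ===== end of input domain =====

-- B folds the moves (right to left) into one composed index table and indexes vec once;
-- A threads the state vector through every move. Alternative decomposition, same cost.

-- shared helper: the comprehension '[xs[c] for c in cs]' (none = IndexError)
def pvMapGet (xs : List Int) : List Int → Option (List Int)
  | [] => some []
  | j :: js =>
    match PySem.List.pyGet? xs j with
    | none => none
    | some v =>
      match pvMapGet xs js with
      | none => none
      | some vs => some (v :: vs)

-- ===== PORT A =====
-- state = list(vec); for move in moves: perm = generators.get(move) (KeyError → none);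
-- state = _apply_perm(state, perm)
def pvALoop (generators : List (String × List Int)) : List Int → List String → Option (List Int)
  | state, [] => some state
  | state, m :: ms =>
    match PySem.Dict.get? (PySem.Dict.mk generators) m with
    | none => none
    | some perm =>
      match pvMapGet state perm with
      | none => none
      | some st => pvALoop generators st ms

def apply_moves (vec : List Int) (moves : List String) (generators : List (String × List Int)) : List Int :=
  (pvALoop generators vec moves).getD []      -- .getD [] unreachable under Pre_ (A raises there)

-- ===== PORT B =====
-- comp = None; for move in reversed(moves): perm = generators.get(move) (KeyError → none);
-- comp = list(perm) if comp is None else [perm[c] for c in comp]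
def pvBLoop (generators : List (String × List Int)) : List String → Option (List Int) → Option (Option (List Int))
  | [], comp => some comp
  | m :: ms, comp =>
    match PySem.Dict.get? (PySem.Dict.mk generators) m with
    | none => none
    | some perm =>
      match comp with
      | none => pvBLoop generators ms (some perm)
      | some c =>
        match pvMapGet perm c with
        | none => none
        | some c' => pvBLoop generators ms (some c')

def apply_moves_alt (vec : List Int) (moves : List String) (generators : List (String × List Int)) : List Int :=
  match pvBLoop generators moves.reverse none with
  | none => []                  -- unreachable under Pre_ (B raises there)
  | some none => vec            -- no moves: list(vec)
  | some (some comp) =>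
    match pvMapGet vec comp with
    | none => []                -- unreachable under Pre_
    | some out => out

-- ===== PRECONDITION & SPEC =====
-- Pre_ excludes exactly the inputs where Python A raises: a move missing from generators
-- (KeyError), or a permutation entry out of Python index range of the current state,
-- whose length is vec.length before the first move and the previous perm's length after.
def Pre_apply_moves (vec : List Int) (moves : List String) (generators : List (String × List Int)) : Prop :=
  (∀ m ∈ moves, (PySem.Dict.get? (PySem.Dict.mk generators) m).isSome = true) ∧
  (∀ p ∈ ((vec.length :: moves.map (fun m => ((PySem.Dict.get? (PySem.Dict.mk generators) m).getD []).length)).zip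
          (moves.map (fun m => (PySem.Dict.get? (PySem.Dict.mk generators) m).getD []))),
     ∀ j ∈ p.2, PySem.Raise.InRange p.1 j)
instance (vec : List Int) (moves : List String) (generators : List (String × List Int)) : Decidable (Pre_apply_moves vec moves generators) := by unfold Pre_apply_moves; infer_instance

def pvWitness_apply_moves : List Int × List String × (List (String × List Int)) :=
  ([3, 4, 5], ["x", "y", "x"], [("x", [2, 0, 1]), ("y", [1, -1, 0])])

def Spec_apply_moves (vec : List Int) (moves : List String) (generators : List (String × List Int)) (out : List Int) : Prop := out = apply_moves_alt vec moves generators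
instance (vec : List Int) (moves : List String) (generators : List (String × List Int)) (out : List Int) : Decidable (Spec_apply_moves vec moves generators out) := by unfold Spec_apply_moves; infer_instance

-- ===== CLAIM (what is proved, stated in full; the proofs are below) =====
def Claim_equal_apply_moves : Prop := ∀ (vec : List Int) (moves : List String) (generators : List (String × List Int)), Dom_apply_moves vec moves generators → Pre_apply_moves vec moves generators → Spec_apply_moves vec moves generators (apply_moves vec moves generators)

-- ===== LEMMAS AND PROOFS =====

-- the chained validity condition the induction runs on
def pvChainOk (generators : List (String × List Int)) : Nat → List String → Prop
  | _, [] => True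
  | L, m :: ms =>
    match PySem.Dict.get? (PySem.Dict.mk generators) m with
    | none => False
    | some perm => (∀ j ∈ perm, PySem.Raise.InRange L j) ∧ pvChainOk generators perm.length ms

theorem pre_to_chain (generators : List (String × List Int)) :
    ∀ (moves : List String) (L : Nat),
      (∀ m ∈ moves, (PySem.Dict.get? (PySem.Dict.mk generators) m).isSome = true) →
      (∀ p ∈ ((L :: moves.map (fun m => ((PySem.Dict.get? (PySem.Dict.mk generators) m).getD []).length)).zip
              (moves.map (fun m => (PySem.Dict.get? (PySem.Dict.mk generators) m).getD []))),
         ∀ j ∈ p.2, PySem.Raise.InRange p.1 j) →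
      pvChainOk generators L moves := by
  intro moves
  induction moves with
  | nil => intro L _ _; trivial
  | cons m ms ih =>
    intro L hkeys hzip
    obtain ⟨perm, hperm⟩ := Option.isSome_iff_exists.mp (hkeys m (by simp))
    unfold pvChainOk
    rw [hperm]
    refine ⟨?_, ih perm.length (fun x hx => hkeys x (by simp [hx])) ?_⟩
    · intro j hj
      have := hzip (L, perm) (by simp [hperm])
      exact this j hj
    · intro p hp j hj
      refine hzip p ?_ j hj
      simp only [List.map_cons, List.zip_cons_cons, List.mem_cons]
      right
      simpa [hperm] using hp

theorem mapGet_length (xs : List Int) : ∀ (js vs : List Int), pvMapGet xs js = some vs → vs.length = js.length := by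
  intro js
  induction js with
  | nil => intro vs h; simp [pvMapGet] at h; simp [← h]
  | cons j js ih =>
    intro vs h
    simp only [pvMapGet] at h
    cases hg : PySem.List.pyGet? xs j with
    | none => rw [hg] at h; simp at h
    | some v =>
      rw [hg] at h
      cases hr : pvMapGet xs js with
      | none => rw [hr] at h; simp at h
      | some ws => rw [hr] at h; simp at h; simp [← h, ih ws hr]

theorem mapGet_some (xs : List Int) : ∀ (js : List Int), (∀ j ∈ js, PySem.Raise.InRange xs.length j) →
    ∃ vs, pvMapGet xs js = some vs := by
  intro js
  induction js with
  | nil => intro _; exact ⟨[], rfl⟩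
  | cons j js ih =>
    intro h
    obtain ⟨vs, hvs⟩ := ih (fun x hx => h x (by simp [hx]))
    have hin : PySem.List.pyGet? xs j ≠ none := by
      intro hn
      rw [PySem.List.pyGet?_eq_none_iff] at hn
      exact hn (h j (by simp))
    obtain ⟨v, hv⟩ := Option.ne_none_iff_exists'.mp hin
    exact ⟨v :: vs, by simp [pvMapGet, hv, hvs]⟩

theorem mapGet_get (xs : List Int) : ∀ (js vs : List Int), pvMapGet xs js = some vs →
    ∀ (k : Nat) (h1 : k < js.length) (h2 : k < vs.length),
      PySem.List.pyGet? xs js[k] = some vs[k] := by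
  intro js
  induction js with
  | nil => intro vs _ k h1; simp at h1
  | cons j js ih =>
    intro vs h k h1 h2
    simp only [pvMapGet] at h
    cases hg : PySem.List.pyGet? xs j with
    | none => rw [hg] at h; simp at h
    | some v =>
      rw [hg] at h
      cases hr : pvMapGet xs js with
      | none => rw [hr] at h; simp at h
      | some ws =>
        rw [hr] at h
        simp only [Option.some.injEq] at h
        subst h
        cases k with
        | zero => simpa using hg
        | succ n =>
          simp only [List.getElem_cons_succ]
          exact ih ws hr n (by simp at h1; omega) (by simp at h2; omega)

-- indexing the mapped list = indexing through the permutation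
theorem pyGet_comp (s perm st : List Int) (h : pvMapGet s perm = some st) (j : Int) :
    PySem.List.pyGet? st j = (PySem.List.pyGet? perm j).bind (PySem.List.pyGet? s) := by
  have hlen : st.length = perm.length := mapGet_length s perm st h
  by_cases hr : PySem.Raise.InRange perm.length j
  · have hr' : PySem.Raise.InRange st.length j := by rwa [hlen]
    by_cases hj : 0 ≤ j
    · have hjn : j.toNat < perm.length := by
        unfold PySem.Raise.InRange at hr; omega
      rw [PySem.List.pyGet?_of_nonneg st hj, PySem.List.pyGet?_of_nonneg perm hj,
          List.getElem?_eq_getElem (by omega : j.toNat < st.length),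
          List.getElem?_eq_getElem hjn]
      simp only [Option.bind_some]
      exact (mapGet_get s perm st h j.toNat hjn (by omega)).symm
    · have hj' : j < 0 := by omega
      set k : Nat := (-j).toNat with hk
      have hjk : j = -(k : Int) := by omega
      have hk0 : 0 < k := by omega
      have hkl : k ≤ perm.length := by unfold PySem.Raise.InRange at hr; omega
      rw [hjk, PySem.List.pyGet?_neg_natCast _ _ hk0 (by omega : k ≤ st.length),
          PySem.List.pyGet?_neg_natCast _ _ hk0 hkl,
          show st.length - k = perm.length - k from by omega]
      have hidx : perm.length - k < perm.length := by omega
      rw [List.getElem?_eq_getElem (by omega : perm.length - k < st.length),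
          List.getElem?_eq_getElem hidx]
      simp only [Option.bind_some]
      exact (mapGet_get s perm st h (perm.length - k) hidx (by omega)).symm
  · have h1 : PySem.List.pyGet? st j = none := by
      rw [PySem.List.pyGet?_eq_none_iff]; rwa [hlen]
    have h2 : PySem.List.pyGet? perm j = none := by
      rw [PySem.List.pyGet?_eq_none_iff]; exact hr
    rw [h1, h2]; rfl

-- composing two index maps
theorem mapGet_comp (s perm st : List Int) (h : pvMapGet s perm = some st) :
    ∀ c : List Int, pvMapGet st c = (pvMapGet perm c).bind (pvMapGet s) := by
  intro c
  induction c with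
  | nil => simp [pvMapGet]
  | cons j js ih =>
    simp only [pvMapGet]
    rw [pyGet_comp s perm st h j, ih]
    cases hg : PySem.List.pyGet? perm j with
    | none => rfl
    | some p =>
      cases hp : PySem.List.pyGet? s p with
      | none => cases hrest : pvMapGet perm js <;> simp [pvMapGet, hp]
      | some v =>
        cases hrest : pvMapGet perm js with
        | none => simp [hp]
        | some cs => simp [pvMapGet, hp]

theorem bLoop_append (generators : List (String × List Int)) :
    ∀ (xs ys : List String) (comp : Option (List Int)),
      pvBLoop generators (xs ++ ys) comp =
        (pvBLoop generators xs comp).bind (fun c => pvBLoop generators ys c) := by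
  intro xs
  induction xs with
  | nil => intro ys comp; rfl
  | cons m ms ih =>
    intro ys comp
    cases hget : PySem.Dict.get? (PySem.Dict.mk generators) m with
    | none => simp [pvBLoop, hget]
    | some perm =>
      cases comp with
      | none => simp [pvBLoop, hget, ih]
      | some c =>
        cases hmg : pvMapGet perm c with
        | none => simp [pvBLoop, hget, hmg]
        | some c' => simp [pvBLoop, hget, hmg, ih]

theorem main_lemma (generators : List (String × List Int)) :
    ∀ (moves : List String) (state : List Int),
      pvChainOk generators state.length moves →
      ∃ comp stA, pvBLoop generators moves.reverse none = some comp ∧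
        pvALoop generators state moves = some stA ∧
        (match comp with
         | none => state = stA
         | some c => pvMapGet state c = some stA) := by
  intro moves
  induction moves with
  | nil => intro state _; exact ⟨none, state, rfl, rfl, rfl⟩
  | cons m ms ih =>
    intro state hok
    unfold pvChainOk at hok
    cases hperm : PySem.Dict.get? (PySem.Dict.mk generators) m with
    | none => rw [hperm] at hok; exact absurd hok not_false
    | some perm =>
      rw [hperm] at hok
      obtain ⟨hbounds, hrest⟩ := hok
      obtain ⟨st1, hst1⟩ := mapGet_some state perm hbounds
      have hlen1 : st1.length = perm.length := mapGet_length state perm st1 hst1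
      obtain ⟨comp', stA, hB, hA, hS⟩ := ih st1 (by rwa [hlen1])
      have hrev : (m :: ms).reverse = ms.reverse ++ [m] := by simp
      rw [hrev, bLoop_append, hB]
      simp only [Option.bind_some]
      have hAstep : pvALoop generators state (m :: ms) = pvALoop generators st1 ms := by
        simp [pvALoop, hperm, hst1]
      cases comp' with
      | none =>
        refine ⟨some perm, stA, ?_, ?_, ?_⟩
        · simp [pvBLoop, hperm]
        · rw [hAstep]; exact hA
        · simp only at hS
          rw [← hS]; exact hst1
      | some c =>
        simp only at hS
        have hcomp := mapGet_comp state perm st1 hst1 c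
        rw [hS] at hcomp
        cases hpc : pvMapGet perm c with
        | none => rw [hpc] at hcomp; simp at hcomp
        | some c'' =>
          rw [hpc] at hcomp
          simp only [Option.bind_some] at hcomp
          refine ⟨some c'', stA, ?_, ?_, ?_⟩
          · simp [pvBLoop, hperm, hpc]
          · rw [hAstep]; exact hA
          · exact hcomp.symm

-- ===== VERDICT (by name: the statement is the Claim_ definition above) =====
theorem apply_moves_spec : Claim_equal_apply_moves := by
  unfold Claim_equal_apply_moves
  intro vec moves generators _ hpre
  obtain ⟨hkeys, hzip⟩ := hpre
  have hchain : pvChainOk generators vec.length moves := pre_to_chain generators moves vec.length hkeys hzip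
  obtain ⟨comp, stA, hB, hA, hS⟩ := main_lemma generators moves vec hchain
  unfold Spec_apply_moves apply_moves apply_moves_alt
  rw [hA, hB]
  cases comp with
  | none => simpa using hS.symm
  | some c =>
    simp only at hS
    simp [hS]
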